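-- pv_equiv track=rewrite | github.com/pixelboehm/Advent-of-Code | 2021/day03.py | get_content2
-- ===== SOURCE A (Python) =====
-- def get_content2(content, i):
--     one_counter = 0
--     zero_counter = 0
--     for j in range(len(content)):
--         if content[j][i] == '1':
--             one_counter += 1
--         elif content[j][i] == '0':
--             zero_counter += 1
--     if one_counter < zero_counter:
--         result = [x for x in content if x[i] == '1']
--     else:
--         result = [x for x in content if x[i] == '0']
--     return result
-- ===== SOURCE B (Python) =====
-- def get_content2(content, i):
--     ones = []
--     zeros = []
--     for x in content:
--         if x[i] == '1':
--             ones.append(x)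
--         elif x[i] == '0':
--             zeros.append(x)
--     return ones if len(ones) < len(zeros) else zeros
-- ===== Notes on version B (the rewrite author's own statement) =====
-- stated objective: simpler
-- what changed: Replaces A's two passes (a counting loop over indices plus a second filtering comprehension) with one partitioning pass that builds both candidate lists and selects the shorter one (ties keep zeros).
import Mathlib
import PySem

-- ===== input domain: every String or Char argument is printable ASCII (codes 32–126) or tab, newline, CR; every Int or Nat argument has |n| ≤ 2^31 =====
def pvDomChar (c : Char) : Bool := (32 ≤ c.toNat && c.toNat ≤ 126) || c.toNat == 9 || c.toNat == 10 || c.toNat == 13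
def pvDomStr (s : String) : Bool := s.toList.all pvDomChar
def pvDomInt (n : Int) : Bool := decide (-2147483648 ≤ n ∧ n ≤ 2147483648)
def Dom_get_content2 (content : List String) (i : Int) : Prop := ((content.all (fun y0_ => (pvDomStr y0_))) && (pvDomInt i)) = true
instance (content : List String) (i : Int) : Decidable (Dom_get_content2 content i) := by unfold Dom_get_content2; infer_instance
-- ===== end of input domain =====

-- B fuses A's counting pass + filtering pass into one partitioning pass; objective: simpler (same O(n) cost).

-- shared predicate: x[i] == c  (Python indexing, negative indices wrap; none = IndexError)
def pvIsBit (i : Int) (c : Char) (x : String) : Bool := PySem.Str.pyGet? x i == some c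

-- ===== PORT A =====
def get_content2 (content : List String) (i : Int) : List String :=
  let counts : Int × Int :=
    (PySem.List.pyRange 0 (content.length : Int) 1).foldl
      (fun (acc : Int × Int) j =>
        let row := PySem.List.pyGetD content j ""
        if pvIsBit i '1' row then (acc.1 + 1, acc.2)
        else if pvIsBit i '0' row then (acc.1, acc.2 + 1)
        else acc) (0, 0)
  if counts.1 < counts.2 then content.filter (pvIsBit i '1')
  else content.filter (pvIsBit i '0')

-- ===== PORT B =====
def get_content2_alt (content : List String) (i : Int) : List String :=
  let p : List String × List String :=
    content.foldl
      (fun (acc : List String × List String) x =>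
        if pvIsBit i '1' x then (acc.1 ++ [x], acc.2)
        else if pvIsBit i '0' x then (acc.1, acc.2 ++ [x])
        else acc) ([], [])
  if p.1.length < p.2.length then p.1 else p.2

-- ===== PRECONDITION & SPEC =====
-- Pre_: Python A indexes every row at i (IndexError if out of range for any row)
def Pre_get_content2 (content : List String) (i : Int) : Prop :=
  content.all (fun x => (PySem.Str.pyGet? x i).isSome) = true
instance (content : List String) (i : Int) : Decidable (Pre_get_content2 content i) := by
  unfold Pre_get_content2; infer_instance

def pvWitness_get_content2 : List String × Int := (["01", "10", "11"], 0)

def Spec_get_content2 (content : List String) (i : Int) (out : List String) : Prop := out = get_content2_alt content i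
instance (content : List String) (i : Int) (out : List String) : Decidable (Spec_get_content2 content i out) := by unfold Spec_get_content2; infer_instance

-- ===== CLAIM (what is proved, stated in full; the proofs are below) =====
def Claim_equal_get_content2 : Prop := ∀ (content : List String) (i : Int), Dom_get_content2 content i → Pre_get_content2 content i → Spec_get_content2 content i (get_content2 content i)

-- ===== LEMMAS AND PROOFS =====

-- B's fold builds exactly (ones-filter, zeros-filter), prefixed by the accumulators
lemma alt_fold (content : List String) (i : Int) (o z : List String) :
    content.foldl
      (fun (acc : List String × List String) x =>
        if pvIsBit i '1' x then (acc.1 ++ [x], acc.2)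
        else if pvIsBit i '0' x then (acc.1, acc.2 ++ [x])
        else acc) (o, z)
    = (o ++ content.filter (pvIsBit i '1'), z ++ content.filter (pvIsBit i '0')) := by
  induction content generalizing o z with
  | nil => simp
  | cons x xs ih =>
    by_cases h1 : pvIsBit i '1' x
    · have h0 : pvIsBit i '0' x = false := by
        unfold pvIsBit at h1 ⊢
        rw [beq_iff_eq] at h1
        rw [beq_eq_false_iff_ne, h1]
        decide
      simp [List.foldl, h1, h0, ih]
    · by_cases h0 : pvIsBit i '0' x
      · simp [List.foldl, h1, h0, ih]
      · simp [List.foldl, h1, h0, ih]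

-- A's counting fold adds the filters' lengths to the accumulators
lemma count_fold (content : List String) (i : Int) (c1 c2 : Int) :
    content.foldl
      (fun (acc : Int × Int) row =>
        if pvIsBit i '1' row then (acc.1 + 1, acc.2)
        else if pvIsBit i '0' row then (acc.1, acc.2 + 1)
        else acc) (c1, c2)
    = (c1 + (content.filter (pvIsBit i '1')).length, c2 + (content.filter (pvIsBit i '0')).length) := by
  induction content generalizing c1 c2 with
  | nil => simp
  | cons x xs ih =>
    by_cases h1 : pvIsBit i '1' x
    · have h0 : pvIsBit i '0' x = false := by
        unfold pvIsBit at h1 ⊢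
        rw [beq_iff_eq] at h1
        rw [beq_eq_false_iff_ne, h1]
        decide
      simp only [List.foldl, h1, h0, if_true, Bool.false_eq_true, if_false, ih,
        List.filter_cons, Prod.mk.injEq]
      constructor <;> push_cast [List.length_cons] <;> omega
    · by_cases h0 : pvIsBit i '0' x
      · simp only [List.foldl, h1, h0, if_true, if_false, ih, List.filter_cons,
          Prod.mk.injEq]
        constructor <;> push_cast [List.length_cons] <;> omega
      · simp [List.foldl, h1, h0, ih]

-- ===== VERDICT (by name: the statement is the Claim_ definition above) =====
theorem get_content2_spec : Claim_equal_get_content2 := by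
  intro content i _ _
  unfold Spec_get_content2 get_content2 get_content2_alt
  rw [PySem.List.foldl_pyRange_zero_pyGetD' content ""
      (fun (acc : Int × Int) row =>
        if pvIsBit i '1' row then (acc.1 + 1, acc.2)
        else if pvIsBit i '0' row then (acc.1, acc.2 + 1)
        else acc) (0, 0)]
  rw [count_fold, alt_fold]
  simp only [List.nil_append, Int.zero_add, zero_add]
  by_cases h : (content.filter (pvIsBit i '1')).length < (content.filter (pvIsBit i '0')).length
  · have : ((content.filter (pvIsBit i '1')).length : Int) < (content.filter (pvIsBit i '0')).length := by
      exact_mod_cast h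
    simp [h, this]
  · have : ¬ (((content.filter (pvIsBit i '1')).length : Int) < (content.filter (pvIsBit i '0')).length) := by
      exact_mod_cast h
    simp [h, this]
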